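-- pv_equiv track=rewrite | github.com/Kirtooo/cal_hacks | 2.py | get_possibility_helper
-- ===== SOURCE A (Python) =====
-- def get_possibility_helper(course_lst, number_for_choosing, curr_lst):
--     if (number_for_choosing == 0 or course_lst == []):
--         return [curr_lst]
--     else:
--         first_course = course_lst[0]
--         curr_lst_copy = [ele for ele in curr_lst]
--         curr_lst.append(first_course)
--         return get_possibility_helper(course_lst[1:], number_for_choosing - 1, curr_lst) + get_possibility_helper(course_lst[1:], number_for_choosing, curr_lst_copy)
-- ===== SOURCE B (Python) =====
-- def get_possibility_helper(course_lst, number_for_choosing, curr_lst):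
--     # Iterative DFS with an explicit stack of (index, partial, budget) frames.
--     # Does not mutate curr_lst (A appends to it in place); return value is identical.
--     results = []
--     stack = [(0, curr_lst, number_for_choosing)]
--     while stack:
--         i, partial, budget = stack.pop()
--         if budget == 0 or i >= len(course_lst):
--             results.append(partial)
--         else:
--             stack.append((i + 1, partial, budget))
--             stack.append((i + 1, partial + [course_lst[i]], budget - 1))
--     return results
-- ===== Notes on version B (the rewrite author's own statement) =====
-- stated objective: alternative
-- what changed: Replaced A's binary recursion (include/exclude with in-place append and list copying) by an iterative DFS over an explicit stack of (index, partial, budget) frames that pushes the exclude frame before the include frame and appends leaves in pop order.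
import Mathlib
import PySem

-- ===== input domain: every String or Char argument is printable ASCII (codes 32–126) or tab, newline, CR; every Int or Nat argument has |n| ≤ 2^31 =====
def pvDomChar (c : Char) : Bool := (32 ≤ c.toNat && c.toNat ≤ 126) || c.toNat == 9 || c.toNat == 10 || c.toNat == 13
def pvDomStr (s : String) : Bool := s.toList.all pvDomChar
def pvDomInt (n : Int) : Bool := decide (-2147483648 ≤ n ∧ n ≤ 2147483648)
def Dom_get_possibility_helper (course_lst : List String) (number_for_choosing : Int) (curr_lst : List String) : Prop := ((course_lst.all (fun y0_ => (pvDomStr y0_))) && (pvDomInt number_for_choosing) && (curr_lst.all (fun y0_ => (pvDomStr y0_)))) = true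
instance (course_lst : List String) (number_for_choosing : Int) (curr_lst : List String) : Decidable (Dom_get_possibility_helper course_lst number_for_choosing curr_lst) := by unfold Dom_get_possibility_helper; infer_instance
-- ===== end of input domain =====

-- B replaces A's binary recursion by an iterative explicit-stack DFS (alternative decomposition);
-- A mutates its curr_lst argument in place, B does not — the equivalence proved is about the return value only.

-- ===== PORT A =====
def get_possibility_helper (course_lst : List String) (number_for_choosing : Int) (curr_lst : List String) : List (List String) :=
  if number_for_choosing = 0 ∨ course_lst = [] then [curr_lst]
  else
    match course_lst with
    | [] => [curr_lst]  -- unreachable: course_lst ≠ [] in this branch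
    | first_course :: rest =>
        get_possibility_helper rest (number_for_choosing - 1) (curr_lst ++ [first_course]) ++
        get_possibility_helper rest number_for_choosing curr_lst
termination_by course_lst.length

-- ===== PORT B =====
-- the while loop of Source B: stack head = top of stack; pushes exclude then include, so include is popped first
def gphAltLoop (course_lst : List String) (stack : List (Nat × List String × Int)) (results : List (List String)) : List (List String) :=
  match stack with
  | [] => results
  | (i, part, budget) :: rest =>
    if budget = 0 ∨ course_lst.length ≤ i then
      gphAltLoop course_lst rest (results ++ [part])
    else
      gphAltLoop course_lst
        ((i + 1, part ++ [(course_lst[i]?).getD ""], budget - 1) :: (i + 1, part, budget) :: rest)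
        results
termination_by (stack.map (fun f => 3 ^ (course_lst.length - f.1))).sum
decreasing_by
  · simp only [List.map_cons, List.sum_cons]
    have : 0 < 3 ^ (course_lst.length - i) := Nat.pow_pos (by norm_num)
    omega
  · simp only [List.map_cons, List.sum_cons]
    rename_i h
    have _hi : i < course_lst.length := by omega
    have hk : course_lst.length - i = (course_lst.length - (i + 1)) + 1 := by omega
    have h3 : 0 < 3 ^ (course_lst.length - (i + 1)) := Nat.pow_pos (by norm_num)
    rw [hk]
    have : 3 ^ ((course_lst.length - (i + 1)) + 1) = 3 * 3 ^ (course_lst.length - (i + 1)) := by ring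
    omega

def get_possibility_helper_alt (course_lst : List String) (number_for_choosing : Int) (curr_lst : List String) : List (List String) :=
  gphAltLoop course_lst [(0, curr_lst, number_for_choosing)] []

-- ===== PRECONDITION & SPEC =====
def Spec_get_possibility_helper (course_lst : List String) (number_for_choosing : Int) (curr_lst : List String) (out : List (List String)) : Prop := out = get_possibility_helper_alt course_lst number_for_choosing curr_lst
instance (course_lst : List String) (number_for_choosing : Int) (curr_lst : List String) (out : List (List String)) : Decidable (Spec_get_possibility_helper course_lst number_for_choosing curr_lst out) := by unfold Spec_get_possibility_helper; infer_instance

-- ===== CLAIM (what is proved, stated in full; the proofs are below) =====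
def Claim_equal_get_possibility_helper : Prop := ∀ (course_lst : List String) (number_for_choosing : Int) (curr_lst : List String), Dom_get_possibility_helper course_lst number_for_choosing curr_lst → Spec_get_possibility_helper course_lst number_for_choosing curr_lst (get_possibility_helper course_lst number_for_choosing curr_lst)

-- ===== LEMMAS AND PROOFS =====

-- a frame (i, p, b) contributes exactly A's result on the suffix course_lst.drop i
theorem gphAltLoop_eq (course_lst : List String) (stack : List (Nat × List String × Int)) (results : List (List String)) :
    gphAltLoop course_lst stack results =
      results ++ (stack.map (fun f => get_possibility_helper (course_lst.drop f.1) f.2.2 f.2.1)).flatten := by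
  induction stack, results using gphAltLoop.induct course_lst with
  | case1 results => simp [gphAltLoop]
  | case2 results i part budget rest h ih =>
      rw [gphAltLoop]
      simp only [h, if_true]
      rw [ih]
      have hleaf : get_possibility_helper (course_lst.drop i) budget part = [part] := by
        rw [get_possibility_helper.eq_def]
        rcases h with h0 | hlen
        · simp [h0]
        · simp [List.drop_eq_nil_of_le hlen]
      simp [hleaf]
  | case3 results i part budget rest h ih =>
      rw [gphAltLoop]
      simp only [h, if_false]
      rw [ih]
      rw [not_or, not_le] at h
      obtain ⟨hb, hi'⟩ := h
      have hdrop : course_lst.drop i = course_lst[i] :: course_lst.drop (i + 1) :=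
        List.drop_eq_getElem_cons hi'
      have hget : (course_lst[i]?).getD "" = course_lst[i] := by
        simp [List.getElem?_eq_getElem hi']
      have hnode : get_possibility_helper (course_lst.drop i) budget part =
          get_possibility_helper (course_lst.drop (i + 1)) (budget - 1) (part ++ [course_lst[i]]) ++
          get_possibility_helper (course_lst.drop (i + 1)) budget part := by
        rw [hdrop, get_possibility_helper.eq_def]
        simp [hb]
        intro h
        exact absurd h (by omega)
      simp only [List.map_cons, List.flatten_cons, hget, hnode]
      simp

-- ===== VERDICT (by name: the statement is the Claim_ definition above) =====
theorem get_possibility_helper_spec : Claim_equal_get_possibility_helper := by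
  intro course_lst n curr _
  unfold Spec_get_possibility_helper get_possibility_helper_alt
  rw [gphAltLoop_eq]
  simp
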